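-- pv_equiv track=rewrite | github.com/Ignisolver/Fake-detection | data_loader.py | _mix_fake_real
-- ===== SOURCE A (Python) =====
-- def _mix_fake_real(fake, real):
--     x = []
--     y = []
--     for f, r in zip(fake, real):
--         x.append(f)
--         y.append(0)
--         x.append(r)
--         y.append(1)
--     return x, y
-- ===== SOURCE B (Python) =====
-- def _mix_fake_real(fake, real):
--     n = min(len(fake), len(real))
--     x = [0] * (2 * n)
--     x[0::2] = fake[:n]
--     x[1::2] = real[:n]
--     y = [0, 1] * n
--     return x, y
-- ===== Notes on version B (the rewrite author's own statement) =====
-- stated objective: alternative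
-- what changed: Replaces A's fused per-pair append loop by preallocating a zeroed list of size 2*min(len) and filling it with two strided slice assignments (x[0::2]=fake[:n], x[1::2]=real[:n]), with labels produced in closed form as [0,1]*n; no per-element Python loop remains.
import Mathlib
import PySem

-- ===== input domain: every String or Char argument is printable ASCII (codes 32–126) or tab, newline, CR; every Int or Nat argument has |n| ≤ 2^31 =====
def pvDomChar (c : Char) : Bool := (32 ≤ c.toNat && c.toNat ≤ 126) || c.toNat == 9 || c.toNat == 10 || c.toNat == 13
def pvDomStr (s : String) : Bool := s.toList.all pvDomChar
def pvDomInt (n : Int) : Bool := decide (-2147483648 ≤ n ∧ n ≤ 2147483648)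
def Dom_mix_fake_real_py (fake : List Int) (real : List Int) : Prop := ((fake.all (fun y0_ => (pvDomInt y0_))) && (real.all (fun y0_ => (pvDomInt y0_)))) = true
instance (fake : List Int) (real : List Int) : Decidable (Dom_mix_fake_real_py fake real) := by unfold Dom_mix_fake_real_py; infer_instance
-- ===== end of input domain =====

-- B replaces A's fused per-pair append loop by preallocating a zeroed list of size 2*min(len)
-- and filling it with two strided slice assignments, labels in closed form; same cost, no per-pair loop.

-- ===== PORT A =====
-- literal port of A's loop: fold over zip(fake, real), appending to x and y in turn
def mix_fake_real_py (fake : List Int) (real : List Int) : List Int × List Int :=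
  (fake.zip real).foldl (fun (s : List Int × List Int) fr =>
    (s.1 ++ [fr.1] ++ [fr.2], s.2 ++ [0] ++ [1])) ([], [])

-- ===== PORT B =====
-- hand model of Python's extended-slice assignment `x[0::2] = vals` (exact: writes vals at
-- indices 0,2,4,…; here the value count always matches the slice length, as in Source B)
def pvWriteStride2 : List Int → List Int → List Int
  | _ :: x1 :: xs, v :: vs => v :: x1 :: pvWriteStride2 xs vs
  | _ :: [], v :: _ => [v]
  | xs, [] => xs
  | [], _ => []

-- `x[1::2] = vals`: keep index 0, then write at the even positions of the tail
def pvWriteStride2Off1 : List Int → List Int → List Int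
  | [], _ => []
  | x0 :: xs, vals => x0 :: pvWriteStride2 xs vals

-- Source B step for step: n = min lengths; x = [0]*(2n); x[0::2] = fake[:n]; x[1::2] = real[:n];
-- y = [0,1]*n  (fake[:n] with 0 ≤ n ≤ len is exactly List.take n)
def mix_fake_real_py_alt (fake : List Int) (real : List Int) : List Int × List Int :=
  let n := min fake.length real.length
  let x0 := List.replicate (2 * n) (0 : Int)
  let x1 := pvWriteStride2 x0 (fake.take n)
  let x := pvWriteStride2Off1 x1 (real.take n)
  (x, (List.replicate n ([(0 : Int), 1])).flatten)

-- ===== PRECONDITION & SPEC =====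
def Spec_mix_fake_real_py (fake : List Int) (real : List Int) (out : List Int × List Int) : Prop := out = mix_fake_real_py_alt fake real
instance (fake : List Int) (real : List Int) (out : List Int × List Int) : Decidable (Spec_mix_fake_real_py fake real out) := by unfold Spec_mix_fake_real_py; infer_instance

-- ===== CLAIM (what is proved, stated in full; the proofs are below) =====
def Claim_equal_mix_fake_real_py : Prop := ∀ (fake : List Int) (real : List Int), Dom_mix_fake_real_py fake real → Spec_mix_fake_real_py fake real (mix_fake_real_py fake real)

-- ===== LEMMAS AND PROOFS =====

-- A's fold from an arbitrary accumulator appends the flattened pairs and the labels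
theorem mix_foldl_eq (l : List (Int × Int)) (x y : List Int) :
    l.foldl (fun (s : List Int × List Int) fr =>
      (s.1 ++ [fr.1] ++ [fr.2], s.2 ++ [0] ++ [1])) (x, y)
    = (x ++ l.flatMap (fun fr => [fr.1, fr.2]),
       y ++ (List.replicate l.length ([(0 : Int), 1])).flatten) := by
  induction l generalizing x y with
  | nil => simp
  | cons hd tl ih =>
    rw [List.foldl_cons, ih, List.flatMap_cons, List.length_cons, List.replicate_succ,
        List.flatten_cons]
    simp

-- writing at odd positions of 0 :: W equals consing the value and writing odds of W
theorem writeStride2_zero_cons (W : List Int) (r : Int) (rs : List Int) :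
    pvWriteStride2 ((0 : Int) :: W) (r :: rs) = r :: pvWriteStride2Off1 W rs := by
  cases W <;> rfl

-- the two strided writes into a zeroed list of length 2n reproduce the interleaving
theorem strided_writes_eq_interleave (a : List Int) :
    ∀ b : List Int, a.length = b.length →
    pvWriteStride2Off1 (pvWriteStride2 (List.replicate (2 * a.length) (0 : Int)) a) b
      = (a.zip b).flatMap (fun fr => [fr.1, fr.2]) := by
  induction a with
  | nil => intro b hb; simp [pvWriteStride2, pvWriteStride2Off1]
  | cons v vs ih =>
    intro b hb
    cases b with
    | nil => simp at hb
    | cons r rs =>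
      have hlen : vs.length = rs.length := by simpa using hb
      have h2 : 2 * (v :: vs).length = (2 * vs.length) + 1 + 1 := by
        simp [List.length_cons]; omega
      rw [h2, List.replicate_succ, List.replicate_succ]
      show pvWriteStride2Off1
          (pvWriteStride2 (0 :: 0 :: List.replicate (2 * vs.length) 0) (v :: vs)) (r :: rs) = _
      rw [show pvWriteStride2 ((0:Int) :: 0 :: List.replicate (2 * vs.length) 0) (v :: vs)
            = v :: 0 :: pvWriteStride2 (List.replicate (2 * vs.length) 0) vs from rfl]
      rw [show pvWriteStride2Off1 (v :: (0:Int) :: pvWriteStride2 (List.replicate (2 * vs.length) 0) vs) (r :: rs)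
            = v :: pvWriteStride2 ((0:Int) :: pvWriteStride2 (List.replicate (2 * vs.length) 0) vs) (r :: rs) from rfl]
      rw [writeStride2_zero_cons, ih rs hlen]
      simp

-- truncating both lists to min length does not change their zip
theorem zip_take_min (a b : List Int) :
    (a.take (min a.length b.length)).zip (b.take (min a.length b.length)) = a.zip b := by
  induction a generalizing b with
  | nil => simp
  | cons v vs ih =>
    cases b with
    | nil => simp
    | cons r rs =>
      simp only [List.length_cons, List.zip_cons_cons]
      rw [show min (vs.length + 1) (rs.length + 1) = min vs.length rs.length + 1 by omega]
      simp only [List.take_succ_cons, List.zip_cons_cons, ih]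

-- ===== VERDICT (by name: the statement is the Claim_ definition above) =====
theorem mix_fake_real_py_spec : Claim_equal_mix_fake_real_py := by
  intro fake real _
  unfold Spec_mix_fake_real_py mix_fake_real_py mix_fake_real_py_alt
  rw [mix_foldl_eq]
  have hlen : (fake.take (min fake.length real.length)).length
      = min fake.length real.length := by simp
  have hlen2 : (fake.take (min fake.length real.length)).length
      = (real.take (min fake.length real.length)).length := by simp
  have h := strided_writes_eq_interleave (fake.take (min fake.length real.length))
      (real.take (min fake.length real.length)) hlen2
  rw [hlen, zip_take_min] at h
  simp only [List.nil_append, h, List.length_zip]
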